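-- pv_equiv track=rewrite | github.com/afrobotDev/LockedIn | Big-O-Analysis/ordern_squared.py | does_name_exist
-- ===== SOURCE A (Python) =====
-- def does_name_exist(first_names, last_names, full_name):
--     if len(first_names) == 0 or len(last_names) == 0:
--             return None
--     for first in first_names:
--         for last in last_names:
--             name = ' '.join((first, last))
--             if name == full_name:
--                 return True
--
--     return False
-- ===== SOURCE B (Python) =====
-- def does_name_exist(first_names, last_names, full_name):
--     if not first_names or not last_names:
--         return None
--     firsts = set(first_names)
--     lasts = set(last_names)
--     for i, ch in enumerate(full_name):
--         if ch == ' ' and full_name[:i] in firsts and full_name[i+1:] in lasts: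
--             return True
--     return False
-- ===== Notes on version B (the rewrite author's own statement) =====
-- stated objective: faster
-- what changed: Instead of scanning name pairs, B scans the split points of full_name itself: at each space it checks the prefix against a set of first names and the suffix against a set of last names, eliminating both loops over the pair space.
import Mathlib
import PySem

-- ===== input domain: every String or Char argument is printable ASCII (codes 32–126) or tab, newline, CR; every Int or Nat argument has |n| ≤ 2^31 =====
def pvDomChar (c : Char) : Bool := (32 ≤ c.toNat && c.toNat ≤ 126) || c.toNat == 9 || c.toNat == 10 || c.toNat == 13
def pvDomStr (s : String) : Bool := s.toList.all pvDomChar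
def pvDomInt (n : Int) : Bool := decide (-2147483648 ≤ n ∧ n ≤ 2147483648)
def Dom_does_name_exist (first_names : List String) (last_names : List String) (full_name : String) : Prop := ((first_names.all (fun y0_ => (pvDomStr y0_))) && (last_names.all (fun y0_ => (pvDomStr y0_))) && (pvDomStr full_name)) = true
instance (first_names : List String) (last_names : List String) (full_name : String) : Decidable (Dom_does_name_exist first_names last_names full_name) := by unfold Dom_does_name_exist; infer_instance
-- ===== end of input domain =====

-- B inverts the search: instead of scanning (first, last) pairs, it scans the
-- split points of full_name itself — at each space character it checks the
-- prefix against a set of first names and the suffix against a set of last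
-- names (objective: faster, asymptotic).

-- ===== PORT A =====
def does_name_exist (first_names : List String) (last_names : List String) (full_name : String) : Option Bool :=
  if first_names.length == 0 || last_names.length == 0 then none
  else if first_names.any (fun first =>
          last_names.any (fun last =>
            PySem.Str.join " " [first, last] == full_name))
       then some true else some false

-- ===== PORT B =====
def does_name_exist_alt (first_names : List String) (last_names : List String) (full_name : String) : Option Bool :=
  if first_names.isEmpty || last_names.isEmpty then none
  else
    let firsts : PySem.Set String := PySem.Set.ofList first_names
    let lasts : PySem.Set String := PySem.Set.ofList last_names
    if (PySem.List.enumerate full_name.toList).any (fun p =>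
         p.2 == ' ' &&
         PySem.Set.contains firsts (PySem.Str.slice full_name none (some p.1)) &&
         PySem.Set.contains lasts (PySem.Str.slice full_name (some (p.1 + 1)) none))
       then some true else some false

-- ===== PRECONDITION & SPEC =====
def Spec_does_name_exist (first_names : List String) (last_names : List String) (full_name : String) (out : Option Bool) : Prop := out = does_name_exist_alt first_names last_names full_name
instance (first_names : List String) (last_names : List String) (full_name : String) (out : Option Bool) : Decidable (Spec_does_name_exist first_names last_names full_name out) := by unfold Spec_does_name_exist; infer_instance

-- ===== CLAIM (what is proved, stated in full; the proofs are below) =====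
def Claim_equal_does_name_exist : Prop := ∀ (first_names : List String) (last_names : List String) (full_name : String), Dom_does_name_exist first_names last_names full_name → Spec_does_name_exist first_names last_names full_name (does_name_exist first_names last_names full_name)

-- ===== LEMMAS AND PROOFS =====

-- String `==` is equality of the character lists.
theorem pv_str_beq_iff (s t : String) : (s == t) = true ↔ s.toList = t.toList := by
  rw [beq_iff_eq, String.toList_inj]

-- A's pair (first, last) matches full iff full's character list splits as
-- first ++ ' ' ++ last at position (length of first).
theorem pv_pair_iff (first last full : String) :
    (PySem.Str.join " " [first, last] == full) = true ↔
      full.toList = first.toList ++ ' ' :: last.toList := by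
  rw [pv_str_beq_iff, PySem.Str.toList_join]
  simp only [List.map_cons, List.map_nil, PySem.Chars.join_cons_cons, PySem.Chars.join_singleton]
  have hsp : (" " : String).toList = [' '] := by decide
  rw [hsp]
  constructor
  · intro h; rw [← h]; simp
  · intro h; rw [h]; simp

-- B's scan over split points of full equals A's scan over all pairs.
theorem pv_scan_eq (first_names last_names : List String) (full : String) :
    (PySem.List.enumerate full.toList).any (fun p =>
         p.2 == ' ' &&
         PySem.Set.contains (PySem.Set.ofList first_names) (PySem.Str.slice full none (some p.1)) &&
         PySem.Set.contains (PySem.Set.ofList last_names) (PySem.Str.slice full (some (p.1 + 1)) none)) =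
    first_names.any (fun first =>
      last_names.any (fun last => PySem.Str.join " " [first, last] == full)) := by
  rw [Bool.eq_iff_iff, List.any_eq_true, List.any_eq_true]
  constructor
  · rintro ⟨p, hmem, hp⟩
    rw [PySem.List.mem_enumerate_iff] at hmem
    obtain ⟨k, hk, rfl⟩ := hmem
    simp only [Bool.and_eq_true, beq_iff_eq] at hp
    obtain ⟨⟨hch, h1⟩, h2⟩ := hp
    rw [PySem.Set.contains_iff, PySem.Set.mem_ofList] at h1 h2
    refine ⟨_, h1, List.any_eq_true.2 ⟨_, h2, ?_⟩⟩
    rw [pv_pair_iff]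
    have hz : (0 : Int) + (k : Int) = ((k : Nat) : Int) := by omega
    have hz1 : (0 : Int) + (k : Int) + 1 = (((k + 1 : Nat)) : Int) := by omega
    have hpre : (PySem.Str.slice full none (some ((0 : Int) + (k : Int)))).toList =
        full.toList.take k := by
      rw [PySem.Str.toList_slice, PySem.Chars.slice_eq_listSlice, hz,
          PySem.List.slice_to_natCast]
    have hsuf : (PySem.Str.slice full (some ((0 : Int) + (k : Int) + 1)) none).toList =
        full.toList.drop (k + 1) := by
      rw [PySem.Str.toList_slice, PySem.Chars.slice_eq_listSlice, hz1,
          PySem.List.slice_from_natCast]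
    rw [hpre, hsuf]
    calc full.toList = full.toList.take k ++ full.toList.drop k := (List.take_append_drop _ _).symm
      _ = full.toList.take k ++ ' ' :: full.toList.drop (k + 1) := by
          congr 1
          rw [List.drop_eq_getElem_cons hk, hch]
  · rintro ⟨first, hf, hinner⟩
    rw [List.any_eq_true] at hinner
    obtain ⟨last, hl, hpair⟩ := hinner
    rw [pv_pair_iff] at hpair
    set k := first.toList.length with hkdef
    have hk : k < full.toList.length := by rw [hpair]; simp [hkdef]
    refine ⟨((0 : Int) + (k : Int), full.toList[k]), ?_, ?_⟩
    · rw [PySem.List.mem_enumerate_iff]; exact ⟨k, hk, rfl⟩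
    · have hch : full.toList[k] = ' ' := by
        have : full.toList[k]? = some ' ' := by
          rw [hpair, List.getElem?_append_right (by simp [hkdef])]
          simp [hkdef]
        simpa [List.getElem?_eq_getElem hk] using this
      simp only [Bool.and_eq_true, beq_iff_eq]
      refine ⟨⟨hch, ?_⟩, ?_⟩
      · rw [PySem.Set.contains_iff, PySem.Set.mem_ofList]
        have : PySem.Str.slice full none (some ((0 : Int) + (k : Int))) = first := by
          rw [← String.toList_inj, PySem.Str.toList_slice, PySem.Chars.slice_eq_listSlice]
          have hz : (0 : Int) + (k : Int) = ((k : Nat) : Int) := by omega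
          rw [hz, PySem.List.slice_to_natCast, hpair]
          simp [hkdef]
        rw [this]; exact hf
      · rw [PySem.Set.contains_iff, PySem.Set.mem_ofList]
        have : PySem.Str.slice full (some ((0 : Int) + (k : Int) + 1)) none = last := by
          rw [← String.toList_inj, PySem.Str.toList_slice, PySem.Chars.slice_eq_listSlice]
          have hz1 : (0 : Int) + (k : Int) + 1 = (((k + 1 : Nat)) : Int) := by omega
          rw [hz1, PySem.List.slice_from_natCast, hpair,
              show first.toList ++ ' ' :: last.toList = (first.toList ++ [' ']) ++ last.toList from by simp]
          exact List.drop_left' (by simp [hkdef])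
        rw [this]; exact hl

-- ===== VERDICT (by name: the statement is the Claim_ definition above) =====
theorem does_name_exist_spec : Claim_equal_does_name_exist := by
  intro fn ln full _
  unfold Spec_does_name_exist does_name_exist does_name_exist_alt
  cases fn with
  | nil => simp
  | cons f fs =>
    cases ln with
    | nil => simp
    | cons l ls =>
      simp only [List.length_cons, List.isEmpty_cons, Bool.false_or]
      rw [pv_scan_eq (f :: fs) (l :: ls) full]
      norm_num
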